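-- pv_equiv track=rewrite | github.com/sandrohp88/code_fight | arcade/the core/spring_of_integration.py | runnersMeetings
-- ===== SOURCE A (Python) =====
-- def runnersMeetings(startPosition, speed):
--     meeting = 0
--     met = 0 if len(startPosition) == len(set(startPosition)) else len(
--         startPosition) - len(set(startPosition)) + 1
--     if met > meeting:
--         meeting = met
--     startPosition = [s * 60 for s in startPosition]
--
--     for _ in range(59940):
--         for i in range(len(startPosition)):
--             startPosition[i] += speed[i]
--         met = 0 if len(startPosition) == len(set(startPosition)) else len(
--             startPosition) - len(set(startPosition)) + 1
--         if met > meeting: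
--             meeting = met
--
--     return -1 if meeting == 0 else meeting
-- ===== SOURCE B (Python) =====
-- def runnersMeetings(startPosition, speed):
--     # event-based: positions are 60*s_i + t*v_i for integer t in [0, 59940];
--     # collisions can only appear/change at pairwise integer meeting times (and t=0).
--     pts = list(zip([p * 60 for p in startPosition], speed))
--     n = len(pts)
--     times = {0}
--     for i in range(n):
--         p1, v1 = pts[i]
--         for j in range(i + 1, n):
--             p2, v2 = pts[j]
--             if v1 != v2:
--                 dp = p2 - p1
--                 dv = v1 - v2
--                 if dp % dv == 0:
--                     t = dp // dv
--                     if 0 <= t <= 59940: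
--                         times.add(t)
--     best = 0
--     for t in times:
--         pos = [p + v * t for p, v in pts]
--         c = len(pos) - len(set(pos))
--         if c and c + 1 > best:
--             best = c + 1
--     return -1 if best == 0 else best
-- ===== Notes on version B (the rewrite author's own statement) =====
-- stated objective: faster
-- what changed: Instead of simulating all 59940 time steps and recounting duplicates at each step, B computes the integer pairwise meeting times as events and evaluates the collision count only at those times plus t=0.
import Mathlib
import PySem

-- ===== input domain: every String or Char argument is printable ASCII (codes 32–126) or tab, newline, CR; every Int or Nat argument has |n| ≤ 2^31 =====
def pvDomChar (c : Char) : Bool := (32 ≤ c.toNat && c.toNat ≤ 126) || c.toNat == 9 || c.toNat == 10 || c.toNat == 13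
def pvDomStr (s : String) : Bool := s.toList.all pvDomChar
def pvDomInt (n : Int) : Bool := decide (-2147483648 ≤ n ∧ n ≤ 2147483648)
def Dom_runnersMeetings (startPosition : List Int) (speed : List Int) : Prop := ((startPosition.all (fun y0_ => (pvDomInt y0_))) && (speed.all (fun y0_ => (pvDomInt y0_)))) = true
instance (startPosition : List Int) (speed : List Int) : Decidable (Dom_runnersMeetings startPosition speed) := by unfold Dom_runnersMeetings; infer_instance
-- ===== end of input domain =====

-- B replaces A's 59940-step time simulation by evaluating the duplicate count only at the
-- pairwise integer meeting times (plus t=0); objective: faster (constant-factor: the 59940-pass scan disappears).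


-- ===== PORT A =====
-- `0 if len(x) == len(set(x)) else len(x) - len(set(x)) + 1`
def metA (l : List Int) : Int :=
  if l.length = (PySem.Set.ofList l).length then 0
  else (l.length : Int) - ((PySem.Set.ofList l).length : Int) + 1

-- `for i in range(len(startPosition)): startPosition[i] += speed[i]`
-- (speed[i] raises IndexError when len(speed) < len(startPosition); Pre_ excludes that, pyGetD's default never fires inside Pre_)
def stepPosA (speed pos : List Int) : List Int :=
  (PySem.List.pyRange 0 (pos.length : Int) 1).foldl
    (fun ps i => PySem.List.pySetD ps i (PySem.List.pyGetD ps i 0 + PySem.List.pyGetD speed i 0)) pos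

def runnersMeetings (startPosition : List Int) (speed : List Int) : Int :=
  let meeting : Int := 0
  let met := metA startPosition
  let meeting := if met > meeting then met else meeting
  let startPosition := startPosition.map (fun s => s * 60)
  let st := (PySem.List.pyRange 0 59940 1).foldl
    (fun (st : List Int × Int) _ =>
      let pos := stepPosA speed st.1
      let met := metA pos
      (pos, if met > st.2 then met else st.2))
    (startPosition, meeting)
  if st.2 = 0 then -1 else st.2

-- ===== PORT B =====
def runnersMeetings_alt (startPosition : List Int) (speed : List Int) : Int :=
  let pts := (startPosition.map (fun p => p * 60)).zip speed
  let n : Int := pts.length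
  let times := (PySem.List.pyRange 0 n 1).foldl
    (fun (ts : PySem.Set Int) i =>
      let pv1 := PySem.List.pyGetD pts i (0, 0)
      (PySem.List.pyRange (i + 1) n 1).foldl
        (fun ts j =>
          let pv2 := PySem.List.pyGetD pts j (0, 0)
          if pv1.2 ≠ pv2.2 then
            let dp := pv2.1 - pv1.1
            let dv := pv1.2 - pv2.2
            if PySem.Int.mod dp dv = 0 then
              let t := PySem.Int.floordiv dp dv
              if 0 ≤ t ∧ t ≤ 59940 then PySem.Set.add ts t else ts
            else ts
          else ts)
        ts)
    (PySem.Set.ofList [(0 : Int)])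
  let best := times.foldl
    (fun best t =>
      let pos := pts.map (fun pv => pv.1 + pv.2 * t)
      let c := (pos.length : Int) - ((PySem.Set.ofList pos).length : Int)
      if c ≠ 0 ∧ c + 1 > best then c + 1 else best)
    (0 : Int)
  if best = 0 then -1 else best

-- ===== PRECONDITION & SPEC =====
-- A raises IndexError (speed[i]) as soon as speed is shorter than startPosition; exactly those inputs are excluded.
def Pre_runnersMeetings (startPosition : List Int) (speed : List Int) : Prop :=
  startPosition.length ≤ speed.length
instance (startPosition : List Int) (speed : List Int) : Decidable (Pre_runnersMeetings startPosition speed) := by unfold Pre_runnersMeetings; infer_instance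
def pvWitness_runnersMeetings : List Int × List Int := ([0, 1], [1, 0])

def Spec_runnersMeetings (startPosition : List Int) (speed : List Int) (out : Int) : Prop := out = runnersMeetings_alt startPosition speed
instance (startPosition : List Int) (speed : List Int) (out : Int) : Decidable (Spec_runnersMeetings startPosition speed out) := by unfold Spec_runnersMeetings; infer_instance

-- ===== CLAIM (what is proved, stated in full; the proofs are below) =====
def Claim_equal_runnersMeetings : Prop := ∀ (startPosition : List Int) (speed : List Int), Dom_runnersMeetings startPosition speed → Pre_runnersMeetings startPosition speed → Spec_runnersMeetings startPosition speed (runnersMeetings startPosition speed)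

-- ===== LEMMAS AND PROOFS =====

-- position vector at integer time t, over the zipped (start, speed) pairs
def zposAt (z : List (Int × Int)) (t : Int) : List Int := z.map (fun pv => pv.1 * 60 + pv.2 * t)

-- duplicate count at time t
def fMet (z : List (Int × Int)) (t : Int) : Int := metA (zposAt z t)

-- "some pair (i < j) of distinct-speed runners meets exactly at time t"
def Meets (z : List (Int × Int)) (t : Int) : Prop :=
  ∃ i j, ∃ (hi : i < z.length) (hj : j < z.length), i < j ∧
    (z[i]'hi).2 ≠ (z[j]'hj).2 ∧
    t * ((z[i]'hi).2 - (z[j]'hj).2) = (z[j]'hj).1 * 60 - (z[i]'hi).1 * 60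

-- generic: membership through a fold that only adds elements to a Set
lemma mem_foldl_acc {α : Type} (Q : α → Int → Prop)
    (F : PySem.Set Int → α → PySem.Set Int)
    (hF : ∀ s a x, x ∈ F s a ↔ x ∈ s ∨ Q a x) :
    ∀ (l : List α) (s : PySem.Set Int) (x : Int),
      x ∈ l.foldl F s ↔ x ∈ s ∨ ∃ a ∈ l, Q a x := by
  intro l
  induction l with
  | nil => simp
  | cons h t ih =>
    intro s x
    simp only [List.foldl_cons, ih, hF, List.mem_cons]
    constructor
    · rintro ((hs | hq) | ⟨a, ha, hq⟩)
      · exact Or.inl hs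
      · exact Or.inr ⟨h, Or.inl rfl, hq⟩
      · exact Or.inr ⟨a, Or.inr ha, hq⟩
    · rintro (hs | ⟨a, (rfl | ha), hq⟩)
      · exact Or.inl (Or.inl hs)
      · exact Or.inl (Or.inr hq)
      · exact Or.inr ⟨a, ha, hq⟩

-- running-max upper bound
lemma foldl_max_le {α : Type} (g : α → Int) (c : Int) :
    ∀ (l : List α) (a : Int), a ≤ c → (∀ x ∈ l, g x ≤ c) →
      l.foldl (fun acc x => max acc (g x)) a ≤ c := by
  intro l
  induction l with
  | nil => intro a ha _; simpa using ha
  | cons h t ih =>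
    intro a ha hl
    simp only [List.foldl_cons]
    exact ih _ (max_le ha (hl h (by simp))) (fun x hx => hl x (by simp [hx]))

-- the `if met > acc then met else acc` update IS a running max
lemma ifmax_eq_max (g : Int → Int) (l : List Int) (a : Int) :
    l.foldl (fun acc x => if g x > acc then g x else acc) a
      = l.foldl (fun acc x => max acc (g x)) a := by
  have : (fun (acc : Int) x => if g x > acc then g x else acc) = fun acc x => max acc (g x) := by
    funext acc x
    by_cases h : g x > acc <;> simp [h] <;> omega
  rw [this]

-- distinct count ≤ length
lemma distinct_le_length (l : List Int) : (PySem.Set.ofList l).length ≤ l.length := by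
  have h1 : (PySem.Set.ofList l).length = (PySem.Set.ofList l).toFinset.card :=
    (List.toFinset_card_of_nodup (PySem.Set.nodup_ofList l)).symm
  have h2 : (PySem.Set.ofList l).toFinset = l.toFinset := by
    ext x; simp [PySem.Set.mem_ofList]
  rw [h1, h2]; exact l.toFinset_card_le

lemma add_map_inj (f : Int → Int) (hf : Function.Injective f) (s : List Int) (x : Int) :
    PySem.Set.add (s.map f) (f x) = (PySem.Set.add s x).map f := by
  have hc : PySem.Set.contains (s.map f) (f x) = PySem.Set.contains s x := by
    by_cases h : x ∈ s
    · rw [(PySem.Set.contains_iff _ _).2 h, (PySem.Set.contains_iff _ _).2 (List.mem_map_of_mem h)]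
    · have h2 : f x ∉ s.map f := by
        simp only [List.mem_map]; rintro ⟨y, hy, he⟩; exact h (hf he ▸ hy)
      rw [Bool.eq_iff_iff]
      simp [h, h2]
  simp only [PySem.Set.add, hc]
  split <;> simp

-- ofList commutes with an injective map
lemma ofList_map_inj (f : Int → Int) (hf : Function.Injective f) (l : List Int) :
    PySem.Set.ofList (l.map f) = (PySem.Set.ofList l).map f := by
  rw [PySem.Set.ofList_eq_foldl, PySem.Set.ofList_eq_foldl]
  have : ∀ (s : List Int), (l.map f).foldl PySem.Set.add (s.map f) = (l.foldl PySem.Set.add s).map f := by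
    induction l with
    | nil => intro s; simp
    | cons h t ih =>
      intro s
      rw [List.map_cons, List.foldl_cons, List.foldl_cons, add_map_inj f hf, ih]
  simpa using this []

-- value-collapse monotonicity of the distinct count
lemma distinct_le_distinct (l1 l2 : List Int) (hlen : l1.length = l2.length)
    (h : ∀ i (hi : i < l1.length) j (hj : j < l1.length),
      l2[i]'(hlen ▸ hi) = l2[j]'(hlen ▸ hj) → l1[i]'hi = l1[j]'hj) :
    (PySem.Set.ofList l1).length ≤ (PySem.Set.ofList l2).length := by
  have card_eq : ∀ (l : List Int), (PySem.Set.ofList l).length = l.toFinset.card := by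
    intro l
    have h1 : (PySem.Set.ofList l).length = (PySem.Set.ofList l).toFinset.card :=
      (List.toFinset_card_of_nodup (PySem.Set.nodup_ofList l)).symm
    have h2 : (PySem.Set.ofList l).toFinset = l.toFinset := by
      ext x; simp [PySem.Set.mem_ofList]
    rw [h1, h2]
  rw [card_eq, card_eq]
  set g : Int → Int := fun x => l1.getD (l2.idxOf x) 0 with hg
  have hsub : l1.toFinset ⊆ l2.toFinset.image g := by
    intro x hx
    rw [List.mem_toFinset] at hx
    obtain ⟨i, hi, rfl⟩ := List.getElem_of_mem hx
    rw [Finset.mem_image]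
    refine ⟨l2[i]'(hlen ▸ hi), by rw [List.mem_toFinset]; exact List.getElem_mem _, ?_⟩
    have hmem : l2[i]'(hlen ▸ hi) ∈ l2 := List.getElem_mem _
    have hjlt : l2.idxOf (l2[i]'(hlen ▸ hi)) < l2.length := List.idxOf_lt_length_of_mem hmem
    have hjeq : l2[l2.idxOf (l2[i]'(hlen ▸ hi))]'hjlt = l2[i]'(hlen ▸ hi) := List.getElem_idxOf _
    have := h (l2.idxOf (l2[i]'(hlen ▸ hi))) (by omega) i hi hjeq
    rw [hg]
    simp only []
    rw [List.getD_eq_getElem _ _ (by omega)]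
    exact this
  calc l1.toFinset.card ≤ (l2.toFinset.image g).card := Finset.card_le_card hsub
    _ ≤ l2.toFinset.card := Finset.card_image_le

-- at a non-meeting time every collision is a t=0 collision, so the count is ≤ the t=0 count
lemma fMet_le_of_not_meets (z : List (Int × Int)) (t : Int) (h : ¬ Meets z t) :
    fMet z t ≤ fMet z 0 := by
  have hlen0 : (zposAt z 0).length = z.length := List.length_map ..
  have hlent : (zposAt z t).length = z.length := List.length_map ..
  have key : ∀ i (hi : i < (zposAt z 0).length) j (hj : j < (zposAt z 0).length),
      (zposAt z t)[i]'(by omega) = (zposAt z t)[j]'(by omega) →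
      (zposAt z 0)[i]'hi = (zposAt z 0)[j]'hj := by
    intro i hi j hj heq
    have hi' : i < z.length := by omega
    have hj' : j < z.length := by omega
    simp only [zposAt, List.getElem_map] at heq ⊢
    by_cases hv : (z[i]'hi').2 = (z[j]'hj').2
    · -- equal speeds: starting positions must be equal
      rw [hv] at heq ⊢; linarith
    · -- distinct speeds: they meet at t, contradicting h
      exfalso
      rcases Nat.lt_trichotomy i j with hij | hij | hij
      · exact h ⟨i, j, hi', hj', hij, hv, by linarith [heq]⟩
      · subst hij; exact hv rfl
      · exact h ⟨j, i, hj', hi', hij, fun e => hv e.symm, by linarith [heq]⟩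
  have hd := distinct_le_distinct (zposAt z 0) (zposAt z t) (by omega) key
  have h1 := distinct_le_length (zposAt z 0)
  have h2 := distinct_le_length (zposAt z t)
  unfold fMet metA
  rw [hlen0, hlent] at *
  split <;> split <;> omega

-- the inner index loop of A is pointwise addition of speed
lemma stepPosA_aux (speed : List Int) :
    ∀ (rest : List Int) (k : Nat) (done : List Int), done.length = k →
      k + rest.length ≤ speed.length →
      (PySem.List.pyRange (k : Int) ((k : Int) + (rest.length : Int)) 1).foldl
          (fun ps i => PySem.List.pySetD ps i (PySem.List.pyGetD ps i 0 + PySem.List.pyGetD speed i 0))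
          (done ++ rest)
        = done ++ List.zipWith (fun a b => a + b) rest (speed.drop k) := by
  intro rest
  induction rest with
  | nil => intro k done hd h; simp [PySem.List.pyRange_one_eq_nil]
  | cons r rest' ih =>
    intro k done hd h
    have hk : k < speed.length := by simp at h; omega
    rw [PySem.List.pyRange_one_cons (by simp only [List.length_cons]; push_cast; omega)]
    simp only [List.foldl_cons]
    have hget : PySem.List.pyGetD (done ++ r :: rest') (k : Int) 0 = r := by
      rw [PySem.List.pyGetD_natCast]
      rw [List.getD_eq_getElem _ _ (by simp; omega)]
      simp [← hd]
    have hset : PySem.List.pySetD (done ++ r :: rest') (k : Int)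
        (r + PySem.List.pyGetD speed (k : Int) 0)
        = (done ++ [r + speed[k]'hk]) ++ rest' := by
      rw [PySem.List.pySetD_natCast, PySem.List.pyGetD_natCast]
      rw [List.set_append_right _ _ (by omega)]
      simp [hd, List.getElem?_eq_getElem hk]
    rw [hget, hset]
    have h2 : (k + 1) + rest'.length ≤ speed.length := by simp at h; omega
    have hlen2 : (done ++ [r + speed[k]'hk]).length = k + 1 := by simp [hd]
    have := ih (k + 1) (done ++ [r + speed[k]'hk]) hlen2 h2
    push_cast at this
    rw [show ((k : Int) + ((r :: rest').length : Int)) = (k : Int) + 1 + (rest'.length : Int) by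
      simp only [List.length_cons]; push_cast; ring]
    rw [this, List.append_assoc]
    refine congrArg _ ?_
    rw [List.drop_eq_getElem_cons hk, List.zipWith_cons_cons]
    simp

lemma stepPosA_eq_zipWith (speed pos : List Int) (h : pos.length ≤ speed.length) :
    stepPosA speed pos = List.zipWith (fun a b => a + b) pos speed := by
  have := stepPosA_aux speed pos 0 [] rfl (by simpa using h)
  simpa using this

lemma zposAt_succ (sp sd : List Int) (t : Int) :
    List.zipWith (fun a b => a + b) (zposAt (sp.zip sd) t) sd = zposAt (sp.zip sd) (t + 1) := by
  induction sp generalizing sd with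
  | nil => simp [zposAt]
  | cons s sp' ih =>
    cases sd with
    | nil => simp [zposAt]
    | cons v sd' =>
      simp only [List.zip_cons_cons, zposAt, List.map_cons, List.zipWith_cons_cons]
      refine congrArg₂ _ (by ring) ?_
      exact ih sd'

lemma zposAt_zero (sp sd : List Int) (h : sp.length ≤ sd.length) :
    zposAt (sp.zip sd) 0 = sp.map (fun s => s * 60) := by
  induction sp generalizing sd with
  | nil => simp [zposAt]
  | cons s sp' ih =>
    cases sd with
    | nil => simp at h
    | cons v sd' =>
      simp only [List.zip_cons_cons, zposAt, List.map_cons]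
      refine congrArg₂ _ (by ring) ?_
      exact ih sd' (by simpa using h)

-- ---- proof-side names for the two ports' components (definitionally equal to the ports) ----

def stepA (sd : List Int) (st : List Int × Int) : List Int × Int :=
  let pos := stepPosA sd st.1
  let met := metA pos
  (pos, if met > st.2 then met else st.2)

lemma A_eq (sp sd : List Int) :
    runnersMeetings sp sd =
      (if ((PySem.List.pyRange 0 59940 1).foldl (fun st _ => stepA sd st)
          (sp.map (fun s => s * 60), if metA sp > 0 then metA sp else 0)).2 = 0 then -1
       else ((PySem.List.pyRange 0 59940 1).foldl (fun st _ => stepA sd st)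
          (sp.map (fun s => s * 60), if metA sp > 0 then metA sp else 0)).2) := rfl

def timesB (pts : List (Int × Int)) : PySem.Set Int :=
  (PySem.List.pyRange 0 ((pts.length : Int)) 1).foldl
    (fun (ts : PySem.Set Int) i =>
      let pv1 := PySem.List.pyGetD pts i (0, 0)
      (PySem.List.pyRange (i + 1) ((pts.length : Int)) 1).foldl
        (fun ts j =>
          let pv2 := PySem.List.pyGetD pts j (0, 0)
          if pv1.2 ≠ pv2.2 then
            let dp := pv2.1 - pv1.1
            let dv := pv1.2 - pv2.2
            if PySem.Int.mod dp dv = 0 then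
              let t := PySem.Int.floordiv dp dv
              if 0 ≤ t ∧ t ≤ 59940 then PySem.Set.add ts t else ts
            else ts
          else ts)
        ts)
    (PySem.Set.ofList [(0 : Int)])

def bestB (pts : List (Int × Int)) : Int :=
  (timesB pts).foldl
    (fun best t =>
      let pos := pts.map (fun pv => pv.1 + pv.2 * t)
      let c := (pos.length : Int) - ((PySem.Set.ofList pos).length : Int)
      if c ≠ 0 ∧ c + 1 > best then c + 1 else best)
    (0 : Int)

lemma B_eq (sp sd : List Int) :
    runnersMeetings_alt sp sd =
      (if bestB ((sp.map (fun p => p * 60)).zip sd) = 0 then -1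
       else bestB ((sp.map (fun p => p * 60)).zip sd)) := rfl

lemma metA_map60 (l : List Int) : metA (l.map (fun s => s * 60)) = metA l := by
  have hinj : Function.Injective (fun s : Int => s * 60) := by
    intro a b hab; dsimp at hab; omega
  unfold metA
  rw [ofList_map_inj _ hinj, List.length_map, List.length_map]

lemma pts_eq (sp sd : List Int) :
    (sp.map (fun p => p * 60)).zip sd = (sp.zip sd).map (fun pv => (pv.1 * 60, pv.2)) := by
  rw [List.zip_map_left]
  rfl

lemma A_loop (sp sd : List Int) (hpre : sp.length ≤ sd.length) (k : Nat) (m : Int) :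
    (PySem.List.pyRange 0 (k : Int) 1).foldl (fun st _ => stepA sd st) (zposAt (sp.zip sd) 0, m)
      = (zposAt (sp.zip sd) (k : Int),
         (PySem.List.pyRange 1 ((k : Int) + 1) 1).foldl
           (fun acc t => if fMet (sp.zip sd) t > acc then fMet (sp.zip sd) t else acc) m) := by
  induction k with
  | zero =>
    rw [PySem.List.pyRange_one_eq_nil (by norm_num), PySem.List.pyRange_one_eq_nil (by norm_num)]
    simp
  | succ k ih =>
    have hc : ((k + 1 : Nat) : Int) = (k : Int) + 1 := by push_cast; ring
    rw [hc, PySem.List.pyRange_one_succ_right (by omega)]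
    rw [show (k : Int) + 1 + 1 = ((k : Int) + 1) + 1 from rfl,
        PySem.List.pyRange_one_succ_right (by omega)]
    rw [List.foldl_append, List.foldl_append, ih]
    have hlen : (zposAt (sp.zip sd) (k : Int)).length ≤ sd.length := by
      simp only [zposAt, List.length_map, List.length_zip]
      omega
    simp only [List.foldl_cons, List.foldl_nil, stepA]
    rw [stepPosA_eq_zipWith sd _ hlen, zposAt_succ]
    exact Prod.ext rfl rfl

lemma mem_timesB (pts : List (Int × Int)) (x : Int) :
    x ∈ timesB pts ↔ x = 0 ∨
      ∃ i j : Nat, ∃ (hi : i < pts.length) (hj : j < pts.length), i < j ∧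
        (pts[i]'hi).2 ≠ (pts[j]'hj).2 ∧
        PySem.Int.mod ((pts[j]'hj).1 - (pts[i]'hi).1) ((pts[i]'hi).2 - (pts[j]'hj).2) = 0 ∧
        0 ≤ x ∧ x ≤ 59940 ∧
        x = PySem.Int.floordiv ((pts[j]'hj).1 - (pts[i]'hi).1) ((pts[i]'hi).2 - (pts[j]'hj).2) := by
  have hmem := mem_foldl_acc
    (fun (i : Int) (x : Int) => ∃ j ∈ PySem.List.pyRange (i + 1) ((pts.length : Int)) 1,
      (PySem.List.pyGetD pts i (0, 0)).2 ≠ (PySem.List.pyGetD pts j (0, 0)).2 ∧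
      PySem.Int.mod ((PySem.List.pyGetD pts j (0, 0)).1 - (PySem.List.pyGetD pts i (0, 0)).1)
        ((PySem.List.pyGetD pts i (0, 0)).2 - (PySem.List.pyGetD pts j (0, 0)).2) = 0 ∧
      (0 ≤ PySem.Int.floordiv ((PySem.List.pyGetD pts j (0, 0)).1 - (PySem.List.pyGetD pts i (0, 0)).1)
          ((PySem.List.pyGetD pts i (0, 0)).2 - (PySem.List.pyGetD pts j (0, 0)).2) ∧
        PySem.Int.floordiv ((PySem.List.pyGetD pts j (0, 0)).1 - (PySem.List.pyGetD pts i (0, 0)).1)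
          ((PySem.List.pyGetD pts i (0, 0)).2 - (PySem.List.pyGetD pts j (0, 0)).2) ≤ 59940) ∧
      x = PySem.Int.floordiv ((PySem.List.pyGetD pts j (0, 0)).1 - (PySem.List.pyGetD pts i (0, 0)).1)
        ((PySem.List.pyGetD pts i (0, 0)).2 - (PySem.List.pyGetD pts j (0, 0)).2))
    (fun (ts : PySem.Set Int) i =>
      let pv1 := PySem.List.pyGetD pts i (0, 0)
      (PySem.List.pyRange (i + 1) ((pts.length : Int)) 1).foldl
        (fun ts j =>
          let pv2 := PySem.List.pyGetD pts j (0, 0)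
          if pv1.2 ≠ pv2.2 then
            let dp := pv2.1 - pv1.1
            let dv := pv1.2 - pv2.2
            if PySem.Int.mod dp dv = 0 then
              let t := PySem.Int.floordiv dp dv
              if 0 ≤ t ∧ t ≤ 59940 then PySem.Set.add ts t else ts
            else ts
          else ts)
        ts)
    (fun s i x => by
      refine mem_foldl_acc
        (fun (j : Int) (x : Int) =>
          (PySem.List.pyGetD pts i (0, 0)).2 ≠ (PySem.List.pyGetD pts j (0, 0)).2 ∧
          PySem.Int.mod ((PySem.List.pyGetD pts j (0, 0)).1 - (PySem.List.pyGetD pts i (0, 0)).1)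
            ((PySem.List.pyGetD pts i (0, 0)).2 - (PySem.List.pyGetD pts j (0, 0)).2) = 0 ∧
          (0 ≤ PySem.Int.floordiv ((PySem.List.pyGetD pts j (0, 0)).1 - (PySem.List.pyGetD pts i (0, 0)).1)
              ((PySem.List.pyGetD pts i (0, 0)).2 - (PySem.List.pyGetD pts j (0, 0)).2) ∧
            PySem.Int.floordiv ((PySem.List.pyGetD pts j (0, 0)).1 - (PySem.List.pyGetD pts i (0, 0)).1)
              ((PySem.List.pyGetD pts i (0, 0)).2 - (PySem.List.pyGetD pts j (0, 0)).2) ≤ 59940) ∧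
          x = PySem.Int.floordiv ((PySem.List.pyGetD pts j (0, 0)).1 - (PySem.List.pyGetD pts i (0, 0)).1)
            ((PySem.List.pyGetD pts i (0, 0)).2 - (PySem.List.pyGetD pts j (0, 0)).2))
        (fun ts j =>
          let pv2 := PySem.List.pyGetD pts j (0, 0)
          if (PySem.List.pyGetD pts i (0, 0)).2 ≠ pv2.2 then
            let dp := pv2.1 - (PySem.List.pyGetD pts i (0, 0)).1
            let dv := (PySem.List.pyGetD pts i (0, 0)).2 - pv2.2
            if PySem.Int.mod dp dv = 0 then
              let t := PySem.Int.floordiv dp dv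
              if 0 ≤ t ∧ t ≤ 59940 then PySem.Set.add ts t else ts
            else ts
          else ts) (fun s j x => by
            dsimp only
            split_ifs with h1 h2 h3 <;>
              first
                | (rw [PySem.Set.mem_add]; tauto)
                | tauto)
        _ s x)
    (PySem.List.pyRange 0 ((pts.length : Int)) 1) (PySem.Set.ofList [(0 : Int)]) x
  rw [timesB, hmem]
  have h0 : (x ∈ PySem.Set.ofList [(0 : Int)]) ↔ x = 0 := by
    rw [PySem.Set.mem_ofList]; simp
  rw [h0]
  refine or_congr Iff.rfl ?_
  constructor
  · rintro ⟨i, hi, j, hj, hne, hmod, ⟨hb1, hb2⟩, hx⟩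
    rw [PySem.List.mem_pyRange_one] at hi hj
    have hilt : i.toNat < pts.length := by omega
    have hjlt : j.toNat < pts.length := by omega
    have hgi : PySem.List.pyGetD pts i (0, 0) = pts[i.toNat]'hilt :=
      PySem.List.pyGetD_eq_getElem _ _ (by omega) (by omega)
    have hgj : PySem.List.pyGetD pts j (0, 0) = pts[j.toNat]'hjlt :=
      PySem.List.pyGetD_eq_getElem _ _ (by omega) (by omega)
    rw [hgi, hgj] at hne hmod hb1 hb2 hx
    exact ⟨i.toNat, j.toNat, hilt, hjlt, by omega, hne, hmod, hx ▸ hb1, hx ▸ hb2, hx⟩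
  · rintro ⟨a, b, ha, hb, hab, hne, hmod, hb1, hb2, hx⟩
    refine ⟨(a : Int), ?_, (b : Int), ?_, ?_⟩
    · rw [PySem.List.mem_pyRange_one]; constructor <;> [omega; exact_mod_cast Nat.cast_lt.2 ha]
    · rw [PySem.List.mem_pyRange_one]; constructor <;> [omega; exact_mod_cast Nat.cast_lt.2 hb]
    have hga : PySem.List.pyGetD pts (a : Int) (0, 0) = pts[a]'ha :=
      PySem.List.pyGetD_eq_getElem _ _ (by omega) (by omega)
    have hgb : PySem.List.pyGetD pts (b : Int) (0, 0) = pts[b]'hb :=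
      PySem.List.pyGetD_eq_getElem _ _ (by omega) (by omega)
    rw [hga, hgb]
    exact ⟨hne, hmod, ⟨hx ▸ hb1, hx ▸ hb2⟩, hx⟩

-- membership in B's event set is exactly: t = 0, or a meeting time within the simulated window
lemma mem_timesB_meets (sp sd : List Int) (x : Int) :
    x ∈ timesB ((sp.map (fun p => p * 60)).zip sd) ↔
      x = 0 ∨ (Meets (sp.zip sd) x ∧ 0 ≤ x ∧ x ≤ 59940) := by
  rw [mem_timesB]
  refine or_congr Iff.rfl ?_
  have hlen : ((sp.map (fun p => p * 60)).zip sd).length = (sp.zip sd).length := by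
    rw [pts_eq, List.length_map]
  have hget : ∀ (a : Nat) (ha : a < ((sp.map (fun p => p * 60)).zip sd).length),
      ((sp.map (fun p => p * 60)).zip sd)[a]'ha
        = (((sp.zip sd)[a]'(hlen ▸ ha)).1 * 60, ((sp.zip sd)[a]'(hlen ▸ ha)).2) := by
    intro a ha
    rw [List.getElem_of_eq (pts_eq sp sd) ha, List.getElem_map]
  constructor
  · rintro ⟨i, j, hi, hj, hij, hne, hmod, hb1, hb2, hx⟩
    rw [hget i hi, hget j hj] at hne hmod hx
    set zi := (sp.zip sd)[i]'(hlen ▸ hi) with hzi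
    set zj := (sp.zip sd)[j]'(hlen ▸ hj) with hzj
    have hdv : zi.2 - zj.2 ≠ 0 := sub_ne_zero.2 hne
    have hdvd := (PySem.Int.mod_eq_zero_iff_dvd _ _).1 hmod
    have hfd : PySem.Int.floordiv (zj.1 * 60 - zi.1 * 60) (zi.2 - zj.2) * (zi.2 - zj.2)
        = zj.1 * 60 - zi.1 * 60 := by
      have := PySem.Int.floordiv_mul_add_mod (zj.1 * 60 - zi.1 * 60) (zi.2 - zj.2)
      rw [hmod] at this; linarith
    refine ⟨⟨i, j, hlen ▸ hi, hlen ▸ hj, hij, hne, ?_⟩, hb1, hb2⟩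
    rw [hx, hfd]
  · rintro ⟨⟨i, j, hi, hj, hij, hne, heq⟩, hb1, hb2⟩
    have hdv : (sp.zip sd)[i].2 - (sp.zip sd)[j].2 ≠ 0 := sub_ne_zero.2 hne
    have hdvd : ((sp.zip sd)[i].2 - (sp.zip sd)[j].2) ∣ ((sp.zip sd)[j].1 * 60 - (sp.zip sd)[i].1 * 60) :=
      ⟨x, by linarith⟩
    have hmod := (PySem.Int.mod_eq_zero_iff_dvd _ _).2 hdvd
    have hfd : PySem.Int.floordiv ((sp.zip sd)[j].1 * 60 - (sp.zip sd)[i].1 * 60)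
        ((sp.zip sd)[i].2 - (sp.zip sd)[j].2) = x := by
      have h1 := PySem.Int.floordiv_mul_add_mod ((sp.zip sd)[j].1 * 60 - (sp.zip sd)[i].1 * 60)
        ((sp.zip sd)[i].2 - (sp.zip sd)[j].2)
      rw [hmod, add_zero] at h1
      have h2 : PySem.Int.floordiv ((sp.zip sd)[j].1 * 60 - (sp.zip sd)[i].1 * 60)
          ((sp.zip sd)[i].2 - (sp.zip sd)[j].2) * ((sp.zip sd)[i].2 - (sp.zip sd)[j].2)
          = x * ((sp.zip sd)[i].2 - (sp.zip sd)[j].2) := by linarith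
      exact mul_right_cancel₀ hdv h2
    refine ⟨i, j, hlen ▸ hi, hlen ▸ hj, hij, ?_⟩
    rw [hget i (hlen ▸ hi), hget j (hlen ▸ hj)]
    exact ⟨hne, hmod, hfd.symm ▸ hb1, hfd.symm ▸ hb2, hfd.symm⟩

lemma bestB_eq_max (sp sd : List Int) :
    bestB ((sp.map (fun p => p * 60)).zip sd)
      = (timesB ((sp.map (fun p => p * 60)).zip sd)).foldl
          (fun acc t => max acc (fMet (sp.zip sd) t)) 0 := by
  unfold bestB
  generalize timesB ((sp.map (fun p => p * 60)).zip sd) = l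
  have aux : ∀ (l : List Int) (a : Int), 0 ≤ a →
      l.foldl (fun best t =>
        let pos := ((sp.map (fun p => p * 60)).zip sd).map (fun pv => pv.1 + pv.2 * t)
        let c := (pos.length : Int) - ((PySem.Set.ofList pos).length : Int)
        if c ≠ 0 ∧ c + 1 > best then c + 1 else best) a
      = l.foldl (fun acc t => max acc (fMet (sp.zip sd) t)) a := by
    intro l
    induction l with
    | nil => intro a _; rfl
    | cons t l ih =>
      intro a ha
      have hpos : ((sp.map (fun p => p * 60)).zip sd).map (fun pv => pv.1 + pv.2 * t)
          = zposAt (sp.zip sd) t := by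
        rw [pts_eq, List.map_map]; rfl
      simp only [List.foldl_cons]
      have hd := distinct_le_length (zposAt (sp.zip sd) t)
      have hstep : (let pos := ((sp.map (fun p => p * 60)).zip sd).map (fun pv => pv.1 + pv.2 * t)
          let c := (pos.length : Int) - ((PySem.Set.ofList pos).length : Int)
          if c ≠ 0 ∧ c + 1 > a then c + 1 else a) = max a (fMet (sp.zip sd) t) := by
        simp only [hpos]
        unfold fMet metA
        split_ifs with h1 h2 h3 <;> omega
      rw [hstep]
      exact ih _ (le_trans ha (le_max_left _ _))
  exact aux l 0 le_rfl

lemma main_eq (sp sd : List Int) (hpre : sp.length ≤ sd.length) :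
    runnersMeetings sp sd = runnersMeetings_alt sp sd := by
  rw [A_eq, B_eq]
  have hz0 : sp.map (fun s => s * 60) = zposAt (sp.zip sd) 0 := (zposAt_zero sp sd hpre).symm
  have hA := A_loop sp sd hpre 59940 (if metA sp > 0 then metA sp else 0)
  norm_num at hA
  rw [← hz0] at hA
  rw [hA]
  set z := sp.zip sd
  set pts := (sp.map (fun p => p * 60)).zip sd with hpts
  -- the initial meeting value is max 0 (fMet z 0)
  have hm0 : (if metA sp > 0 then metA sp else 0) = max 0 (fMet z 0) := by
    have : fMet z 0 = metA sp := by
      unfold fMet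
      rw [← hz0, metA_map60]
    rw [this]
    by_cases h : metA sp > 0 <;> simp [h] <;> omega
  rw [hm0, ifmax_eq_max (fMet z)]
  rw [bestB_eq_max sp sd]
  set MA := (PySem.List.pyRange 1 59941 1).foldl (fun acc x => max acc (fMet z x)) (max 0 (fMet z 0)) with hMA
  set MB := (timesB pts).foldl (fun acc t => max acc (fMet z t)) 0 with hMB
  have hB0 : (0 : Int) ≤ MB := (PySem.List.le_foldl_max_int (timesB pts) (fMet z) 0).1
  have hBmem : ∀ t ∈ timesB pts, fMet z t ≤ MB :=
    (PySem.List.le_foldl_max_int (timesB pts) (fMet z) 0).2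
  have hA0 : max 0 (fMet z 0) ≤ MA :=
    (PySem.List.le_foldl_max_int (PySem.List.pyRange 1 59941 1) (fMet z) (max 0 (fMet z 0))).1
  have hAmem : ∀ t ∈ PySem.List.pyRange 1 59941 1, fMet z t ≤ MA :=
    (PySem.List.le_foldl_max_int (PySem.List.pyRange 1 59941 1) (fMet z) (max 0 (fMet z 0))).2
  have h0mem : (0 : Int) ∈ timesB pts := (mem_timesB_meets sp sd 0).2 (Or.inl rfl)
  have hMAB : MA = MB := by
    apply le_antisymm
    · apply foldl_max_le
      · exact max_le hB0 (hBmem 0 h0mem)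
      · intro t ht
        rw [PySem.List.mem_pyRange_one] at ht
        by_cases hm : Meets z t
        · exact hBmem t ((mem_timesB_meets sp sd t).2 (Or.inr ⟨hm, by omega, by omega⟩))
        · exact le_trans (fMet_le_of_not_meets z t hm) (hBmem 0 h0mem)
    · apply foldl_max_le
      · exact le_trans (le_max_left 0 (fMet z 0)) hA0
      · intro x hx
        rcases (mem_timesB_meets sp sd x).1 hx with rfl | ⟨hm, hb1, hb2⟩
        · exact le_trans (le_max_right 0 (fMet z 0)) hA0
        · rcases eq_or_lt_of_le hb1 with rfl | hpos
          · exact le_trans (le_max_right 0 (fMet z 0)) hA0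
          · exact hAmem x (by rw [PySem.List.mem_pyRange_one]; omega)
  rw [hMAB]

theorem runnersMeetings_spec : Claim_equal_runnersMeetings := by
  intro sp sd _hdom hpre
  exact main_eq sp sd hpre
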